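-- pv_equiv track=rewrite | github.com/benjamingarrett/table_maker100 | plot_fib.py | m_0c_even
-- ===== SOURCE A (Python) =====
-- def m_0c_even(n):
--   if n==1:
--     return 1
--   if n==2:
--     return 3
--   if n==3:
--     return 5
--   if n==4:
--     return 6
--   return 2*m_0c_even(n-2)+1
-- ===== SOURCE B (Python) =====
-- def m_0c_even(n):
--   if n == 1:
--     return 1
--   if n == 2:
--     return 3
--   if n % 2:
--     return 6 * (1 << ((n - 3) // 2)) - 1
--   return 7 * (1 << ((n - 4) // 2)) - 1
-- ===== Notes on version B (the rewrite author's own statement) =====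
-- stated objective: faster
-- what changed: Replaced the O(n) recursion f(n)=2*f(n-2)+1 by the closed form 6*2^((n-3)/2)-1 (n odd) / 7*2^((n-4)/2)-1 (n even), computed with one shift.
import Mathlib
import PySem

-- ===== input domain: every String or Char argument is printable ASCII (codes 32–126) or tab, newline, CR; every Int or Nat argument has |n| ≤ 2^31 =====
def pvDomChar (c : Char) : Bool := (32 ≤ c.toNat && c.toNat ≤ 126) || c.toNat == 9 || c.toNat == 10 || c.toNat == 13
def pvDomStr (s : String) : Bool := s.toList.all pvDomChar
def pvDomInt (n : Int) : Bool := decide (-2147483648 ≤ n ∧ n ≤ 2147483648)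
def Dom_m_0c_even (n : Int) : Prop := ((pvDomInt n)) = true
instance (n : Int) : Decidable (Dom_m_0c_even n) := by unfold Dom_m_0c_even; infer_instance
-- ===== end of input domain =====

-- B replaces A's O(n) recursion f(n)=2*f(n-2)+1 by a parity-based closed form with one shift (faster, asymptotic).


-- ===== PORT A =====
-- A's recursion f(n)=2*f(n-2)+1 ported with fuel n.toNat (each call drops n by 2, so n.toNat fuel suffices for n ≥ 1; fuel 0 is unreachable under Pre_).
def m_0c_evenFuel : Nat → Int → Int
  | 0, _ => 0
  | fuel + 1, n =>
    if n = 1 then 1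
    else if n = 2 then 3
    else if n = 3 then 5
    else if n = 4 then 6
    else 2 * m_0c_evenFuel fuel (n - 2) + 1

def m_0c_even (n : Int) : Int := m_0c_evenFuel n.toNat n

-- ===== PORT B =====
def m_0c_even_alt (n : Int) : Int :=
  if n = 1 then 1
  else if n = 2 then 3
  else if PySem.Int.mod n 2 ≠ 0 then 6 * 2 ^ (PySem.Int.floordiv (n - 3) 2).toNat - 1
  else 7 * 2 ^ (PySem.Int.floordiv (n - 4) 2).toNat - 1

-- ===== PRECONDITION & SPEC =====
-- Pre_ excludes n ≤ 0, where A recurses without reaching a base case (RecursionError).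
def Pre_m_0c_even (n : Int) : Prop := 1 ≤ n
instance (n : Int) : Decidable (Pre_m_0c_even n) := by unfold Pre_m_0c_even; infer_instance
def pvWitness_m_0c_even : Int := 7
def Spec_m_0c_even (n : Int) (out : Int) : Prop := out = m_0c_even_alt n
instance (n : Int) (out : Int) : Decidable (Spec_m_0c_even n out) := by unfold Spec_m_0c_even; infer_instance

-- ===== CLAIM (what is proved, stated in full; the proofs are below) =====
def Claim_equal_m_0c_even : Prop := ∀ (n : Int), Dom_m_0c_even n → Pre_m_0c_even n → Spec_m_0c_even n (m_0c_even n)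

-- ===== LEMMAS AND PROOFS =====

-- B's closed form satisfies A's recurrence for n ≥ 5.
lemma alt_rec (n : Int) (h5 : 5 ≤ n) : m_0c_even_alt n = 2 * m_0c_even_alt (n - 2) + 1 := by
  unfold m_0c_even_alt
  rw [PySem.Int.mod_eq_emod_of_pos (a := n) (by norm_num),
      PySem.Int.mod_eq_emod_of_pos (a := n - 2) (by norm_num),
      PySem.Int.floordiv_eq_ediv_of_pos (a := n - 3) (by norm_num),
      PySem.Int.floordiv_eq_ediv_of_pos (a := n - 4) (by norm_num),
      PySem.Int.floordiv_eq_ediv_of_pos (a := n - 2 - 3) (by norm_num),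
      PySem.Int.floordiv_eq_ediv_of_pos (a := n - 2 - 4) (by norm_num)]
  have hmod : (n - 2) % 2 = n % 2 := by omega
  by_cases hodd : n % 2 = 0
  · have h1 : ((n - 4) / 2).toNat = ((n - 2 - 4) / 2).toNat + 1 := by omega
    simp only [hmod, hodd]
    rw [if_neg (show ¬ n = 1 by omega), if_neg (show ¬ n = 2 by omega),
        if_neg (show ¬ n - 2 = 1 by omega), if_neg (show ¬ n - 2 = 2 by omega)]
    simp only [ne_eq, not_true_eq_false, if_false, h1, pow_succ]
    ring
  · have h1 : ((n - 3) / 2).toNat = ((n - 2 - 3) / 2).toNat + 1 := by omega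
    simp only [hmod]
    rw [if_neg (show ¬ n = 1 by omega), if_neg (show ¬ n = 2 by omega),
        if_neg (show ¬ n - 2 = 1 by omega), if_neg (show ¬ n - 2 = 2 by omega),
        if_pos (show ¬ n % 2 = 0 from hodd), if_pos (show ¬ n % 2 = 0 from hodd),
        h1, pow_succ]
    ring

lemma fuel_eq (fuel : Nat) : ∀ (n : Int), 1 ≤ n → n.toNat ≤ fuel → m_0c_evenFuel fuel n = m_0c_even_alt n := by
  induction fuel with
  | zero => intro n h1 h2; omega
  | succ f ih =>
    intro n h1 h2
    unfold m_0c_evenFuel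
    by_cases e1 : n = 1
    · subst e1; simp [m_0c_even_alt]
    by_cases e2 : n = 2
    · subst e2; simp [m_0c_even_alt]
    by_cases e3 : n = 3
    · subst e3
      rw [if_neg e1, if_neg e2, if_pos rfl]
      decide
    by_cases e4 : n = 4
    · subst e4
      rw [if_neg e1, if_neg e2, if_neg e3, if_pos rfl]
      decide
    have h5 : 5 ≤ n := by omega
    rw [if_neg e1, if_neg e2, if_neg e3, if_neg e4, ih (n - 2) (by omega) (by omega),
        alt_rec n h5]

-- ===== VERDICT (by name: the statement is the Claim_ definition above) =====
theorem m_0c_even_spec : Claim_equal_m_0c_even := by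
  intro n _ hpre
  unfold Spec_m_0c_even m_0c_even
  exact fuel_eq n.toNat n hpre (le_refl _)
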